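-- pv_equiv track=rewrite | github.com/IntelLabs/kAFL | kAFL-Fuzzer/fuzzer/technique/redqueen/parser.py | strip_unchanged_bytes_from_mutation
-- ===== SOURCE A (Python) =====
-- def strip_unchanged_bytes_from_mutation(offset, lhs, rhs):
--     assert (len(lhs) == len(rhs))
--     i = 0
--     ll = len(lhs)
--     res_lhss, res_rhss, res_offsets = [], [], []
--     while i < ll:
--         j = i
--         while j < ll and lhs[j] != rhs[j]:
--             j += 1
--         if j != i:
--             res_lhss.append(lhs[i:j])
--             res_rhss.append(rhs[i:j])
--             res_offsets.append(offset + i)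
--         i = j + 1
--     return res_offsets, res_lhss, res_rhss
-- ===== SOURCE B (Python) =====
-- def strip_unchanged_bytes_from_mutation(offset, lhs, rhs):
--     assert (len(lhs) == len(rhs))
--     ll = len(lhs)
--
--     def d(k):
--         return lhs[k] != rhs[k]
--
--     # a run start is a differing position whose predecessor (if any) is equal;
--     # a run end is a differing position whose successor (if any) is equal.
--     starts = [i for i in range(ll) if d(i) and (i == 0 or not d(i - 1))]
--     ends = [i + 1 for i in range(ll) if d(i) and (i == ll - 1 or not d(i + 1))]
--
--     res_offsets = [offset + i for i in starts]
--     res_lhss = [lhs[i:j] for i, j in zip(starts, ends)]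
--     res_rhss = [rhs[i:j] for i, j in zip(starts, ends)]
--     return res_offsets, res_lhss, res_rhss
-- ===== Notes on version B (the rewrite author's own statement) =====
-- stated objective: alternative
-- what changed: Replaced A's stateful nested while-loop scanner by three stateless staged passes: comprehensions that detect run starts and run ends with purely local boundary predicates (d(i) and not d(i-1) / not d(i+1)), then zip the paired boundaries into slices.
import Mathlib
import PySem

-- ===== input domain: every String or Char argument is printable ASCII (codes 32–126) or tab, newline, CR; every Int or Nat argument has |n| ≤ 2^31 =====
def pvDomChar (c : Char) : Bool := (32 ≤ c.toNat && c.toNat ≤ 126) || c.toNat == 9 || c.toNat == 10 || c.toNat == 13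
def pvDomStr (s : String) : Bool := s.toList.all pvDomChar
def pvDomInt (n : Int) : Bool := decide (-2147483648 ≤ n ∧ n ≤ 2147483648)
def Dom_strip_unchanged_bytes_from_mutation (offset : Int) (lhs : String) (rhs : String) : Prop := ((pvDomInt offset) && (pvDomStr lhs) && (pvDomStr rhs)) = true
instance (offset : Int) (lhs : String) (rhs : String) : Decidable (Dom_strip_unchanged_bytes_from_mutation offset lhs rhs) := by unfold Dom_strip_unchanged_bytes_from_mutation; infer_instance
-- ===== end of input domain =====

-- B replaces A's stateful nested while-loop scanner by three stateless comprehension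
-- passes using local boundary predicates (run starts / run ends), then zips them into
-- slices; same cost, equivalence of return values proved under Pre_ (equal lengths, A's assert).

-- ===== PORT A =====
-- inner 'while j < ll and lhs[j] != rhs[j]: j += 1'
-- (indexing as getElem?: exact for j < ll = len(lhs) = len(rhs), which Pre_ guarantees)
def pvAInner (l r : List Char) (ll j : Nat) : Nat :=
  if h : j < ll ∧ l[j]? ≠ r[j]? then pvAInner l r ll (j+1) else j
termination_by ll - j
decreasing_by exact Nat.sub_succ_lt_self ll j h.1

theorem pvAInner_ge (l r : List Char) (ll j : Nat) : j ≤ pvAInner l r ll j := by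
  unfold pvAInner
  split
  · exact Nat.le_trans (Nat.le_succ j) (pvAInner_ge l r ll (j+1))
  · exact Nat.le_refl j
termination_by ll - j
decreasing_by rename_i h; omega

-- outer 'while i < ll' with the three result accumulators
def pvAOuter (offset : Int) (l r : List Char) (ll i : Nat)
    (resO : List Int) (resL resR : List String) : List Int × List String × List String :=
  if h : i < ll then
    let j := pvAInner l r ll i
    if j ≠ i then
      pvAOuter offset l r ll (j+1)
        (resO ++ [offset + (i : Int)])
        (resL ++ [String.ofList (PySem.List.slice l (some (i : Int)) (some (j : Int)))])
        (resR ++ [String.ofList (PySem.List.slice r (some (i : Int)) (some (j : Int)))])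
    else
      pvAOuter offset l r ll (j+1) resO resL resR
  else (resO, resL, resR)
termination_by ll - i
decreasing_by all_goals exact Nat.lt_of_le_of_lt (Nat.sub_le_sub_left (Nat.succ_le_succ (pvAInner_ge l r ll i)) ll) (Nat.sub_succ_lt_self ll i h)

def strip_unchanged_bytes_from_mutation (offset : Int) (lhs : String) (rhs : String) : List Int × List String × List String :=
  pvAOuter offset lhs.toList rhs.toList lhs.toList.length 0 [] [] []

-- ===== PORT B =====
-- Source B's helper d(k): lhs[k] != rhs[k]  (exact for the in-range indices B uses)
def pvDiff (l r : List Char) (k : Nat) : Bool := l[k]? != r[k]?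

-- the two comprehension guards of Source B
def pvStartP (l r : List Char) (i : Nat) : Bool :=
  pvDiff l r i && (i == 0 || !pvDiff l r (i-1))
def pvEndP (l r : List Char) (ll i : Nat) : Bool :=
  pvDiff l r i && (i == ll - 1 || !pvDiff l r (i+1))

def strip_unchanged_bytes_from_mutation_alt (offset : Int) (lhs : String) (rhs : String) : List Int × List String × List String :=
  let l := lhs.toList
  let r := rhs.toList
  let ll := l.length
  let starts := (List.range ll).filter (pvStartP l r)
  let ends := ((List.range ll).filter (pvEndP l r ll)).map (· + 1)
  ((starts.map (fun i => offset + (i : Int))),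
   (starts.zip ends).map (fun (p : Nat × Nat) => String.ofList (PySem.List.slice l (some (p.1 : Int)) (some (p.2 : Int)))),
   (starts.zip ends).map (fun (p : Nat × Nat) => String.ofList (PySem.List.slice r (some (p.1 : Int)) (some (p.2 : Int)))))

-- ===== PRECONDITION & SPEC =====
-- Pre_ excludes exactly the inputs where A's 'assert len(lhs) == len(rhs)' raises AssertionError.
def Pre_strip_unchanged_bytes_from_mutation (offset : Int) (lhs : String) (rhs : String) : Prop :=
  lhs.toList.length = rhs.toList.length
instance (offset : Int) (lhs : String) (rhs : String) : Decidable (Pre_strip_unchanged_bytes_from_mutation offset lhs rhs) := by unfold Pre_strip_unchanged_bytes_from_mutation; infer_instance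

def pvWitness_strip_unchanged_bytes_from_mutation : Int × String × String := (3, "abcd", "axcy")

def Spec_strip_unchanged_bytes_from_mutation (offset : Int) (lhs : String) (rhs : String) (out : List Int × List String × List String) : Prop := out = strip_unchanged_bytes_from_mutation_alt offset lhs rhs
instance (offset : Int) (lhs : String) (rhs : String) (out : List Int × List String × List String) : Decidable (Spec_strip_unchanged_bytes_from_mutation offset lhs rhs out) := by unfold Spec_strip_unchanged_bytes_from_mutation; infer_instance

-- ===== CLAIM (what is proved, stated in full; the proofs are below) =====
def Claim_equal_strip_unchanged_bytes_from_mutation : Prop := ∀ (offset : Int) (lhs : String) (rhs : String), Dom_strip_unchanged_bytes_from_mutation offset lhs rhs → Pre_strip_unchanged_bytes_from_mutation offset lhs rhs → Spec_strip_unchanged_bytes_from_mutation offset lhs rhs (strip_unchanged_bytes_from_mutation offset lhs rhs)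

-- ===== LEMMAS AND PROOFS =====

-- generic 'filter of range, seen from index i upwards'
def pvFilterFrom (p : Nat → Bool) (ll i : Nat) : List Nat :=
  if h : i < ll then (if p i then [i] else []) ++ pvFilterFrom p ll (i+1) else []
termination_by ll - i
decreasing_by exact Nat.sub_succ_lt_self ll i h

theorem pvFilterFrom_eq (p : Nat → Bool) (ll i : Nat) :
    pvFilterFrom p ll i = if i < ll then (if p i then [i] else []) ++ pvFilterFrom p ll (i+1) else [] := by
  rw [pvFilterFrom]; split <;> simp_all

theorem pvFilterFrom_range' (p : Nat → Bool) (ll : Nat) :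
    ∀ n i, ll - i ≤ n → (List.range' i (ll - i)).filter p = pvFilterFrom p ll i := by
  intro n
  induction n with
  | zero =>
    intro i h
    have : ll - i = 0 := by omega
    rw [this, pvFilterFrom_eq, if_neg (by omega)]
    simp
  | succ n ih =>
    intro i h
    by_cases hi : i < ll
    · have hk : ll - i = (ll - (i+1)) + 1 := by omega
      rw [hk, List.range'_succ, List.filter_cons, pvFilterFrom_eq, if_pos hi, ← ih (i+1) (by omega)]
      by_cases hp : p i <;> simp [hp]
    · have : ll - i = 0 := by omega
      rw [this, pvFilterFrom_eq, if_neg hi]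
      simp

theorem pvFilter_range (p : Nat → Bool) (ll : Nat) :
    (List.range ll).filter p = pvFilterFrom p ll 0 := by
  rw [List.range_eq_range']
  have := pvFilterFrom_range' p ll ll 0 (by omega)
  simpa using this

theorem pvAInner_eq (l r : List Char) (ll j : Nat) :
    pvAInner l r ll j = if j < ll ∧ l[j]? ≠ r[j]? then pvAInner l r ll (j+1) else j := by
  rw [pvAInner]; split <;> simp_all

theorem pvAInner_le (l r : List Char) (ll : Nat) :
    ∀ n j, ll - j ≤ n → j ≤ ll → pvAInner l r ll j ≤ ll := by
  intro n
  induction n with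
  | zero =>
    intro j hn hj
    rw [pvAInner_eq, if_neg (by omega)]; omega
  | succ n ih =>
    intro j hn hj
    rw [pvAInner_eq]
    split
    · exact ih (j+1) (by omega) (by rename_i h; omega)
    · omega

-- every position in [j, pvAInner j) differs
theorem pvAInner_run (l r : List Char) (ll : Nat) :
    ∀ n j, ll - j ≤ n → ∀ k, j ≤ k → k < pvAInner l r ll j → pvDiff l r k = true := by
  intro n
  induction n with
  | zero =>
    intro j hn k hk1 hk2
    rw [pvAInner_eq, if_neg (by omega)] at hk2; omega
  | succ n ih =>
    intro j hn k hk1 hk2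
    by_cases h : j < ll ∧ l[j]? ≠ r[j]?
    · rw [pvAInner_eq, if_pos h] at hk2
      by_cases hkj : k = j
      · subst hkj; simp [pvDiff, bne_iff_ne, h.2]
      · exact ih (j+1) (by omega) k (by omega) hk2
    · rw [pvAInner_eq, if_neg h] at hk2; omega

-- the stopping position does not differ (out-of-range indices compare equal: both none)
theorem pvAInner_stop (l r : List Char) (ll : Nat) (hl : l.length = ll) (hr : r.length = ll) :
    ∀ n j, ll - j ≤ n → pvDiff l r (pvAInner l r ll j) = false := by
  intro n
  induction n with
  | zero =>
    intro j hn
    rw [pvAInner_eq, if_neg (by omega)]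
    simp [pvDiff, List.getElem?_eq_none (by omega : l.length ≤ j),
          List.getElem?_eq_none (by omega : r.length ≤ j)]
  | succ n ih =>
    intro j hn
    rw [pvAInner_eq]
    split
    · exact ih (j+1) (by omega)
    · rename_i h
      by_cases hj : j < ll
      · have : l[j]? = r[j]? := by tauto
        simp [pvDiff, this]
      · simp [pvDiff, List.getElem?_eq_none (by omega : l.length ≤ j),
              List.getElem?_eq_none (by omega : r.length ≤ j)]

-- skipping the interior of a run in the starts list: no start strictly inside (i, j]
theorem pvSkipS (l r : List Char) (ll i j : Nat)
    (hrun : ∀ k, i ≤ k → k < j → pvDiff l r k = true)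
    (hstop : pvDiff l r j = false) (hjll : j ≤ ll) :
    ∀ n k, j - k ≤ n → i < k → k ≤ j → pvFilterFrom (pvStartP l r) ll k = pvFilterFrom (pvStartP l r) ll (j+1) := by
  intro n
  induction n with
  | zero =>
    intro k hn h1 h2
    have hkj : k = j := by omega
    subst hkj
    by_cases hk : k < ll
    · rw [pvFilterFrom_eq, if_pos hk, if_neg (by simp [pvStartP, hstop])]
      simp
    · rw [pvFilterFrom_eq, if_neg hk, pvFilterFrom_eq, if_neg (by omega)]
  | succ n ih =>
    intro k hn h1 h2
    by_cases hkj : k = j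
    · subst hkj
      by_cases hk : k < ll
      · rw [pvFilterFrom_eq, if_pos hk, if_neg (by simp [pvStartP, hstop])]
        simp
      · rw [pvFilterFrom_eq, if_neg hk, pvFilterFrom_eq, if_neg (by omega)]
    · -- i < k < j: predecessor differs, so not a start
      have hp : pvStartP l r k = false := by
        have hprev : pvDiff l r (k-1) = true := hrun (k-1) (by omega) (by omega)
        have hk0 : (k == 0) = false := by simp; omega
        simp [pvStartP, hprev, hk0]
      rw [pvFilterFrom_eq, if_pos (by omega), if_neg (by simp [hp])]
      simpa using ih (k+1) (by omega) (by omega) (by omega)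

-- the ends list over a run emits exactly j-1 and nothing else until j+1
theorem pvSkipE (l r : List Char) (ll i j : Nat)
    (hrun : ∀ k, i ≤ k → k < j → pvDiff l r k = true)
    (hstop : pvDiff l r j = false) (hjll : j ≤ ll) (hij : i < j) :
    ∀ n k, j - k ≤ n → i ≤ k → k < j → pvFilterFrom (pvEndP l r ll) ll k = (j-1) :: pvFilterFrom (pvEndP l r ll) ll (j+1) := by
  intro n
  induction n with
  | zero => intro k hn h1 h2; omega
  | succ n ih =>
    intro k hn h1 h2
    by_cases hkj : k = j - 1
    · subst hkj
      have hk : j - 1 < ll := by omega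
      have hpe : pvEndP l r ll (j-1) = true := by
        have hd : pvDiff l r (j-1) = true := hrun (j-1) (by omega) (by omega)
        have hj1 : j - 1 + 1 = j := by omega
        by_cases hll : j = ll
        · simp [pvEndP, hd]; left; omega
        · simp [pvEndP, hd, hj1]; right; exact hstop
      rw [pvFilterFrom_eq, if_pos hk, if_pos (by simp [hpe])]
      have hj1 : j - 1 + 1 = j := by omega
      rw [hj1]
      by_cases hjl : j < ll
      · rw [pvFilterFrom_eq (i := j), if_pos hjl, if_neg (by simp [pvEndP, hstop])]
        simp
      · rw [pvFilterFrom_eq (i := j), if_neg hjl, pvFilterFrom_eq (i := j+1), if_neg (by omega)]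
        simp
    · -- i ≤ k < j-1: successor also differs and k is not the last index
      have hp : pvEndP l r ll k = false := by
        have hnext : pvDiff l r (k+1) = true := hrun (k+1) (by omega) (by omega)
        have hkll : (k == ll - 1) = false := by simp; omega
        simp [pvEndP, hnext, hkll]
      rw [pvFilterFrom_eq, if_pos (by omega), if_neg (by simp [hp])]
      simpa using ih (k+1) (by omega) (by omega) (by omega)

-- main invariant: A's outer loop from i equals appending B's lists restricted to indices ≥ i,
-- provided position i-1 (if any) does not differ
theorem pvMain (offset : Int) (l r : List Char) (ll : Nat)
    (hl : l.length = ll) (hr : r.length = ll) :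
    ∀ n i O L R, ll - i ≤ n → (i = 0 ∨ pvDiff l r (i-1) = false) →
      pvAOuter offset l r ll i O L R =
        (O ++ (pvFilterFrom (pvStartP l r) ll i).map (fun k => offset + (k : Int)),
         L ++ ((pvFilterFrom (pvStartP l r) ll i).zip ((pvFilterFrom (pvEndP l r ll) ll i).map (· + 1))).map
            (fun (p : Nat × Nat) => String.ofList (PySem.List.slice l (some (p.1 : Int)) (some (p.2 : Int)))),
         R ++ ((pvFilterFrom (pvStartP l r) ll i).zip ((pvFilterFrom (pvEndP l r ll) ll i).map (· + 1))).map
            (fun (p : Nat × Nat) => String.ofList (PySem.List.slice r (some (p.1 : Int)) (some (p.2 : Int))))) := by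
  intro n
  induction n with
  | zero =>
    intro i O L R hn hprev
    rw [pvAOuter, dif_neg (by omega : ¬ i < ll)]
    rw [pvFilterFrom_eq, if_neg (by omega), pvFilterFrom_eq, if_neg (by omega)]
    simp
  | succ n ih =>
    intro i O L R hn hprev
    by_cases hi : i < ll
    · by_cases hd : pvDiff l r i = true
      · -- run starting at i: A's inner loop scans to j
        have hdiff : l[i]? ≠ r[i]? := by simpa [pvDiff, bne_iff_ne] using hd
        have hji : i < pvAInner l r ll i := by
          have := pvAInner_ge l r ll (i+1)
          rw [pvAInner_eq, if_pos ⟨hi, hdiff⟩]; omega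
        have hjle : pvAInner l r ll i ≤ ll := pvAInner_le l r ll ll i (by omega) (by omega)
        have hrun : ∀ k, i ≤ k → k < pvAInner l r ll i → pvDiff l r k = true :=
          fun k h1 h2 => pvAInner_run l r ll ll i (by omega) k h1 h2
        have hstop : pvDiff l r (pvAInner l r ll i) = false := pvAInner_stop l r ll hl hr ll i (by omega)
        have hps : pvStartP l r i = true := by
          rcases hprev with h0 | hpf
          · subst h0; simp [pvStartP, hd]
          · simp [pvStartP, hd, hpf]
        have hS : pvFilterFrom (pvStartP l r) ll i = i :: pvFilterFrom (pvStartP l r) ll (pvAInner l r ll i + 1) := by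
          rw [pvFilterFrom_eq, if_pos hi, if_pos (by simp [hps])]
          rw [pvSkipS l r ll i (pvAInner l r ll i) hrun hstop hjle (pvAInner l r ll i) (i+1) (by omega) (by omega) (by omega)]
          simp
        have hE : pvFilterFrom (pvEndP l r ll) ll i =
            (pvAInner l r ll i - 1) :: pvFilterFrom (pvEndP l r ll) ll (pvAInner l r ll i + 1) :=
          pvSkipE l r ll i (pvAInner l r ll i) hrun hstop hjle hji (pvAInner l r ll i) i (by omega) (by omega) (by omega)
        rw [pvAOuter, dif_pos hi]
        simp only []
        rw [if_pos (by omega : pvAInner l r ll i ≠ i)]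
        rw [ih (pvAInner l r ll i + 1) _ _ _ (by have := pvAInner_ge l r ll i; omega)
            (by right
                have h1 : pvAInner l r ll i + 1 - 1 = pvAInner l r ll i := by omega
                rw [h1]; exact hstop)]
        rw [hS, hE]
        have hj1 : pvAInner l r ll i - 1 + 1 = pvAInner l r ll i := by omega
        simp [hj1]
      · -- equal position: inner loop stops immediately, nothing emitted
        have hdf : pvDiff l r i = false := by simpa using hd
        have hdn : ¬ l[i]? ≠ r[i]? := by simpa [pvDiff, bne_iff_ne] using hdf
        have hstop0 : pvAInner l r ll i = i := by rw [pvAInner_eq, if_neg (by tauto)]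
        rw [pvAOuter, dif_pos hi]
        simp only []
        rw [hstop0, if_neg (by omega)]
        rw [pvFilterFrom_eq (p := pvStartP l r), if_pos hi, if_neg (by simp [pvStartP, hdf]),
            pvFilterFrom_eq (p := pvEndP l r ll), if_pos hi, if_neg (by simp [pvEndP, hdf])]
        simpa using ih (i+1) O L R (by omega) (by right; simpa using hdf)
    · rw [pvAOuter, dif_neg hi]
      rw [pvFilterFrom_eq, if_neg hi, pvFilterFrom_eq, if_neg hi]
      simp

-- ===== VERDICT (by name: the statement is the Claim_ definition above) =====
theorem strip_unchanged_bytes_from_mutation_spec : Claim_equal_strip_unchanged_bytes_from_mutation := by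
  intro offset lhs rhs _ hpre
  unfold Spec_strip_unchanged_bytes_from_mutation
  unfold strip_unchanged_bytes_from_mutation strip_unchanged_bytes_from_mutation_alt
  rw [pvMain offset lhs.toList rhs.toList lhs.toList.length rfl hpre.symm
      lhs.toList.length 0 [] [] [] (by omega) (Or.inl rfl)]
  simp [pvFilter_range]
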